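-- pv_equiv track=rewrite | github.com/youcefAZ/RI_project | src/ir/main.py | rsv_produit_interne
-- ===== SOURCE A (Python) =====
-- def rsv_produit_interne(idf,doc_num:str,req_words_vector):
--     """Inner product rsv compute.
--
--     Keyword arguments:
--         idf                 --  {word: {document_it_appears_in : num_occurences_in_this_doc,..},{},...}   (contains all the words!)
--         doc_num             --  document number (or id)
--         req_words_vector    --  {word:1} (containt only words that exists!)
--
--     Returns:
--         inner_product rsv.
--     """
--     res = 0
--     for i in idf: #parcourir tt les mots
--         if (doc_num in idf[i].keys()):
--             w_i_j = idf[i][doc_num]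
--         else:
--             w_i_j  = 0
--
--         if i in req_words_vector:
--             w_i_q = req_words_vector[i]
--         else:
--             w_i_q = 0
--         res = res + w_i_j * w_i_q
--
--     return res
-- ===== SOURCE B (Python) =====
-- def rsv_produit_interne(idf, doc_num: str, req_words_vector):
--     """Inner product rsv: iterate only over the query's words, not the whole vocabulary."""
--     res = 0
--     for word, w_q in req_words_vector.items():
--         row = idf.get(word)
--         if row is not None:
--             res += row.get(doc_num, 0) * w_q
--     return res
-- ===== Notes on version B (the rewrite author's own statement) =====
-- stated objective: alternative
-- what changed: B sums over the query vector's entries with one dict lookup into idf each, instead of A's scan over the entire idf vocabulary; Pre_ only excludes association lists with duplicate keys, which cannot arise from Python dicts.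
import Mathlib
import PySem

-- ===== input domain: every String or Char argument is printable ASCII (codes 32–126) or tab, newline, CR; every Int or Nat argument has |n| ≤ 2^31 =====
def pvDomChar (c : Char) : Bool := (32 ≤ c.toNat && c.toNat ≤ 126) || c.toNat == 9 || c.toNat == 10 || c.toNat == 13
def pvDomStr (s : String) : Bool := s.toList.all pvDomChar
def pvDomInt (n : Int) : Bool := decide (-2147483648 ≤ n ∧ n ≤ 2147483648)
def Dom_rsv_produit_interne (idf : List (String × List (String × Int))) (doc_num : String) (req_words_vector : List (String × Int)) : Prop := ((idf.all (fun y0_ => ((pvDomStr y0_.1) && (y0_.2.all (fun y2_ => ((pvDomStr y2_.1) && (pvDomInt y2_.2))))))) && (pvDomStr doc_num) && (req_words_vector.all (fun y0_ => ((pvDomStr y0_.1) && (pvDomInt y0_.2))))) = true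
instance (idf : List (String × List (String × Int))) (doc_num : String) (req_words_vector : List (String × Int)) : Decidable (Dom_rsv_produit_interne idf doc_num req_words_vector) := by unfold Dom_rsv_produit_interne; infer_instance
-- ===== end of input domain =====

-- B iterates over the query vector's entries with one dict lookup into idf each, instead of A's scan over the whole idf vocabulary (same result; cost proportional to the query instead of the vocabulary, not measured faster on the generated inputs).

-- ===== PORT A =====
-- for i in idf: w_i_j = idf[i][doc_num] if doc_num in idf[i] else 0; w_i_q = req[i] if i in req else 0; res += w_i_j * w_i_q
def rsv_produit_interne (idf : List (String × List (String × Int))) (doc_num : String) (req_words_vector : List (String × Int)) : Int :=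
  (PySem.Dict.mk idf).keys.foldl (fun res i =>
    let row : PySem.Dict String Int := PySem.Dict.mk (((PySem.Dict.mk idf).get? i).getD [])
    let w_i_j : Int := if row.contains doc_num then row.getD doc_num 0 else 0
    let w_i_q : Int := if (PySem.Dict.mk req_words_vector).contains i then (PySem.Dict.mk req_words_vector).getD i 0 else 0
    res + w_i_j * w_i_q) 0

-- ===== PORT B =====
-- for word, w_q in req.items(): row = idf.get(word); if row is not None: res += row.get(doc_num, 0) * w_q
def rsv_produit_interne_alt (idf : List (String × List (String × Int))) (doc_num : String) (req_words_vector : List (String × Int)) : Int :=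
  (PySem.Dict.mk req_words_vector).items.foldl (fun res q =>
    match (PySem.Dict.mk idf).get? q.1 with
    | some row => res + (PySem.Dict.mk row).getD doc_num 0 * q.2
    | none => res) 0

-- ===== PRECONDITION & SPEC =====
-- Pre_ excludes association lists with duplicate keys in idf or req_words_vector: such inputs cannot arise from Python dicts, so A never sees them.
def Pre_rsv_produit_interne (idf : List (String × List (String × Int))) (doc_num : String) (req_words_vector : List (String × Int)) : Prop :=
  (idf.map Prod.fst).Nodup ∧ (req_words_vector.map Prod.fst).Nodup
instance (idf : List (String × List (String × Int))) (doc_num : String) (req_words_vector : List (String × Int)) : Decidable (Pre_rsv_produit_interne idf doc_num req_words_vector) := by unfold Pre_rsv_produit_interne; infer_instance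
def pvWitness_rsv_produit_interne : (List (String × List (String × Int))) × String × (List (String × Int)) :=
  ([("a", [("1", 2)]), ("b", [("2", 4)])], "1", [("a", 3)])

def Spec_rsv_produit_interne (idf : List (String × List (String × Int))) (doc_num : String) (req_words_vector : List (String × Int)) (out : Int) : Prop := out = rsv_produit_interne_alt idf doc_num req_words_vector
instance (idf : List (String × List (String × Int))) (doc_num : String) (req_words_vector : List (String × Int)) (out : Int) : Decidable (Spec_rsv_produit_interne idf doc_num req_words_vector out) := by unfold Spec_rsv_produit_interne; infer_instance

-- ===== CLAIM (what is proved, stated in full; the proofs are below) =====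
def Claim_equal_rsv_produit_interne : Prop := ∀ (idf : List (String × List (String × Int))) (doc_num : String) (req_words_vector : List (String × Int)), Dom_rsv_produit_interne idf doc_num req_words_vector → Pre_rsv_produit_interne idf doc_num req_words_vector → Spec_rsv_produit_interne idf doc_num req_words_vector (rsv_produit_interne idf doc_num req_words_vector)

-- ===== LEMMAS AND PROOFS =====

-- With distinct keys, the indicator sum over an association list is the looked-up value.
lemma sum_ite_key (l : List (String × List (String × Int))) (k : String) (g : List (String × Int) → Int)
    (h : (l.map Prod.fst).Nodup) :
    (l.map (fun p => if p.1 = k then g p.2 else 0)).sum =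
      (match (PySem.Dict.mk l).get? k with | some row => g row | none => 0) := by
  induction l with
  | nil => simp [PySem.Dict.get?]
  | cons p t ih =>
    simp only [List.map_cons, List.nodup_cons] at h
    rw [List.map_cons, List.sum_cons, PySem.Dict.get?_mk_cons, ih h.2]
    by_cases hk : p.1 = k
    · subst hk
      rw [if_pos rfl]
      simp only [beq_self_eq_true, if_true]
      have : ((PySem.Dict.mk t).get? p.1) = none := by
        rw [PySem.Dict.get?_eq_none_iff_not_mem_keys]
        simpa [PySem.Dict.keys] using h.1
      rw [this]; ring_nf
    · rw [if_neg hk]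
      have : (p.1 == k) = false := by simpa using hk
      simp [this]

-- getD over a missing key is the default 0.
lemma getD_not_mem (l : List (String × Int)) (k : String) (h : k ∉ l.map Prod.fst) :
    (PySem.Dict.mk l).getD k 0 = 0 := by
  apply PySem.Dict.getD_of_not_contains
  simpa [PySem.Dict.contains_eq_decide_mem_keys, PySem.Dict.keys] using h

-- Core exchange: A's sum over the vocabulary equals B's sum over the query.
lemma exchange (idf : List (String × List (String × Int))) (doc_num : String) (req : List (String × Int))
    (hidf : (idf.map Prod.fst).Nodup) (hreq : (req.map Prod.fst).Nodup) :
    (idf.map (fun p => (PySem.Dict.mk (((PySem.Dict.mk idf).get? p.1).getD [])).getD doc_num 0 * (PySem.Dict.mk req).getD p.1 0)).sum =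
    (req.map (fun q => match (PySem.Dict.mk idf).get? q.1 with
      | some row => (PySem.Dict.mk row).getD doc_num 0 * q.2
      | none => 0)).sum := by
  induction req with
  | nil =>
    simp only [List.map_nil, List.sum_nil]
    rw [show (fun p : String × List (String × Int) => (PySem.Dict.mk (((PySem.Dict.mk idf).get? p.1).getD [])).getD doc_num 0 * (PySem.Dict.mk ([] : List (String × Int))).getD p.1 0)
        = (fun p => 0) from funext fun p => by simp [PySem.Dict.getD, PySem.Dict.get?]]
    simp
  | cons q t ih =>
    simp only [List.map_cons, List.nodup_cons] at hreq
    rw [List.map_cons, List.sum_cons, ← ih hreq.2]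
    have hsplit : ∀ p : String × List (String × Int),
        (PySem.Dict.mk (((PySem.Dict.mk idf).get? p.1).getD [])).getD doc_num 0 * (PySem.Dict.mk (q :: t)).getD p.1 0
        = (if p.1 = q.1 then (PySem.Dict.mk (((PySem.Dict.mk idf).get? p.1).getD [])).getD doc_num 0 * q.2 else 0)
          + (PySem.Dict.mk (((PySem.Dict.mk idf).get? p.1).getD [])).getD doc_num 0 * (PySem.Dict.mk t).getD p.1 0 := by
      intro p
      rw [PySem.Dict.getD_eq_get?_getD (PySem.Dict.mk (q :: t)) p.1 0, PySem.Dict.get?_mk_cons]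
      by_cases hk : p.1 = q.1
      · have hb : (q.1 == p.1) = true := by simp [hk]
        have hnm : p.1 ∉ List.map Prod.fst t := by rw [hk]; exact hreq.1
        rw [if_pos hk, hb, getD_not_mem t p.1 hnm]
        simp
      · have hb : (q.1 == p.1) = false := by simpa using fun hc => hk hc.symm
        rw [if_neg hk, hb]
        simp [PySem.Dict.getD_eq_get?_getD]
    calc (idf.map (fun p => (PySem.Dict.mk (((PySem.Dict.mk idf).get? p.1).getD [])).getD doc_num 0 * (PySem.Dict.mk (q :: t)).getD p.1 0)).sum
        = (idf.map (fun p => (if p.1 = q.1 then (PySem.Dict.mk (((PySem.Dict.mk idf).get? p.1).getD [])).getD doc_num 0 * q.2 else 0)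
            + (PySem.Dict.mk (((PySem.Dict.mk idf).get? p.1).getD [])).getD doc_num 0 * (PySem.Dict.mk t).getD p.1 0)).sum := by
          exact congrArg List.sum (List.map_congr_left fun p _ => hsplit p)
      _ = (idf.map (fun p => if p.1 = q.1 then (PySem.Dict.mk (((PySem.Dict.mk idf).get? p.1).getD [])).getD doc_num 0 * q.2 else 0)).sum
            + (idf.map (fun p => (PySem.Dict.mk (((PySem.Dict.mk idf).get? p.1).getD [])).getD doc_num 0 * (PySem.Dict.mk t).getD p.1 0)).sum := by
          rw [PySem.List.sum_map_add_int]
      _ = (idf.map (fun p => if p.1 = q.1 then (PySem.Dict.mk p.2).getD doc_num 0 * q.2 else 0)).sum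
            + (idf.map (fun p => (PySem.Dict.mk (((PySem.Dict.mk idf).get? p.1).getD [])).getD doc_num 0 * (PySem.Dict.mk t).getD p.1 0)).sum := by
          congr 1
          apply congrArg List.sum
          apply List.map_congr_left
          intro p hp
          by_cases hk : p.1 = q.1
          · rw [if_pos hk, if_pos hk]
            have : (PySem.Dict.mk idf).get? p.1 = some p.2 := by
              apply PySem.Dict.get?_of_mem_items
              · exact hp
              · simpa [PySem.Dict.keys] using hidf
            rw [this]
            simp
          · rw [if_neg hk, if_neg hk]
      _ = _ := by
          rw [sum_ite_key idf q.1 (fun row => (PySem.Dict.mk row).getD doc_num 0 * q.2) hidf]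

-- An 'x in d' guard before d.getD x 0 is redundant: the default is 0.
lemma if_contains_getD (d : PySem.Dict String Int) (k : String) :
    (if d.contains k then d.getD k 0 else 0) = d.getD k 0 := by
  cases hc : d.contains k
  · rw [if_neg Bool.false_ne_true, PySem.Dict.getD_of_not_contains d 0 hc]
  · rw [if_pos rfl]

theorem rsv_produit_interne_spec : Claim_equal_rsv_produit_interne := by
  intro idf doc_num req _hDom hPre
  obtain ⟨hidf, hreq⟩ := hPre
  unfold Spec_rsv_produit_interne rsv_produit_interne rsv_produit_interne_alt
  have hA : ((idf.map Prod.fst).foldl (fun res i =>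
      let row : PySem.Dict String Int := PySem.Dict.mk (((PySem.Dict.mk idf).get? i).getD [])
      let w_i_j : Int := if row.contains doc_num then row.getD doc_num 0 else 0
      let w_i_q : Int := if (PySem.Dict.mk req).contains i then (PySem.Dict.mk req).getD i 0 else 0
      res + w_i_j * w_i_q) 0)
      = (idf.map (fun p => (PySem.Dict.mk (((PySem.Dict.mk idf).get? p.1).getD [])).getD doc_num 0 * (PySem.Dict.mk req).getD p.1 0)).sum := by
    rw [show (fun (res : Int) (i : String) =>
        let row : PySem.Dict String Int := PySem.Dict.mk (((PySem.Dict.mk idf).get? i).getD [])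
        let w_i_j : Int := if row.contains doc_num then row.getD doc_num 0 else 0
        let w_i_q : Int := if (PySem.Dict.mk req).contains i then (PySem.Dict.mk req).getD i 0 else 0
        res + w_i_j * w_i_q)
        = (fun res i => res + (PySem.Dict.mk (((PySem.Dict.mk idf).get? i).getD [])).getD doc_num 0 * (PySem.Dict.mk req).getD i 0) from
        funext fun res => funext fun i => by simp only [if_contains_getD]]
    rw [List.foldl_map, PySem.List.foldl_add idf (fun p : String × List (String × Int) => (PySem.Dict.mk (((PySem.Dict.mk idf).get? p.1).getD [])).getD doc_num 0 * (PySem.Dict.mk req).getD p.1 0) 0]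
    simp
  have hB : (req.foldl (fun res q =>
      match (PySem.Dict.mk idf).get? q.1 with
      | some row => res + (PySem.Dict.mk row).getD doc_num 0 * q.2
      | none => res) 0)
      = (req.map (fun q => match (PySem.Dict.mk idf).get? q.1 with
        | some row => (PySem.Dict.mk row).getD doc_num 0 * q.2
        | none => 0)).sum := by
    rw [show (fun (res : Int) (q : String × Int) =>
        match (PySem.Dict.mk idf).get? q.1 with
        | some row => res + (PySem.Dict.mk row).getD doc_num 0 * q.2
        | none => res)
        = (fun res q => res + (match (PySem.Dict.mk idf).get? q.1 with
          | some row => (PySem.Dict.mk row).getD doc_num 0 * q.2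
          | none => 0)) from
        funext fun res => funext fun q => by cases (PySem.Dict.mk idf).get? q.1 <;> simp]
    rw [PySem.List.foldl_add req (fun q : String × Int => (match (PySem.Dict.mk idf).get? q.1 with
      | some row => (PySem.Dict.mk row).getD doc_num 0 * q.2
      | none => 0)) 0]
    simp
  have hkeys : (PySem.Dict.mk idf).keys = idf.map Prod.fst := rfl
  have hitems : (PySem.Dict.mk req).items = req := rfl
  rw [hkeys, hitems, hA, hB]
  exact exchange idf doc_num req hidf hreq
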